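-- pv_equiv track=rewrite | github.com/keyu-lai/cs61a | quizs/quiz1.py | same_hailstone
-- ===== SOURCE A (Python) =====
-- def same_hailstone(a, b):
--     """Return whether a and b are both members of the same hailstone
--     sequence.
--
--     >>> same_hailstone(10, 16) # 10, 5, 16, 8, 4, 2, 1
--     True
--     >>> same_hailstone(16, 10) # order doesn't matter
--     True
--     >>> result = same_hailstone(3, 19) # return, don't print
--     >>> result
--     False
--
--     """
--     "*** YOUR CODE HERE ***"
--     assert (a > 0) and (b > 0), "a and b must be integer"
--     def hailstone(n, find):
--         if n == find:
--             return True
--         while n != 1: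
--             if(n % 2 == 0):
--                 n = n // 2
--             else:
--                 n = 3 * n + 1
--             if n == find:
--                 return True
--         return False
--     return hailstone(a, b) or hailstone(b, a)
-- ===== SOURCE B (Python) =====
-- def same_hailstone(a, b):
--     assert (a > 0) and (b > 0), "a and b must be integer"
--     found = a == b
--     x, y = a, b
--     while not found and (x != 1 or y != 1):
--         if x != 1:
--             x = x // 2 if x % 2 == 0 else 3 * x + 1
--             found = found or x == b
--         if y != 1:
--             y = y // 2 if y % 2 == 0 else 3 * y + 1
--             found = found or y == a
--     return found
-- ===== Notes on version B (the rewrite author's own statement) =====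
-- stated objective: alternative
-- what changed: B replaces A's two sequential search passes (hailstone(a,b) then hailstone(b,a)) with one fused lockstep loop that advances both trajectories simultaneously and accumulates a found-flag.
import Mathlib
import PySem

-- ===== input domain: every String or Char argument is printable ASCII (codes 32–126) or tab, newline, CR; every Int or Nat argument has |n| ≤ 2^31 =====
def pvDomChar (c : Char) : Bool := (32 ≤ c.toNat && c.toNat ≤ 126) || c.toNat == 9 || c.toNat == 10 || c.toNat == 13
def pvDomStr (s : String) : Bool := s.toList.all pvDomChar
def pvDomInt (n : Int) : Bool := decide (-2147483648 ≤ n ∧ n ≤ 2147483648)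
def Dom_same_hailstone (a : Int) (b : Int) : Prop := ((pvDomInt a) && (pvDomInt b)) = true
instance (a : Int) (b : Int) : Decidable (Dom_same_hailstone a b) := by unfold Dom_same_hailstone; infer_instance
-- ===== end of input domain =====

-- B fuses A's two sequential search passes into one lockstep loop advancing both
-- trajectories simultaneously with a found-accumulator. Objective: alternative (same cost).
-- Both ports model their Python while-loops with a fuel bound of 100000 iterations; the
-- equivalence theorem holds for every fuel, so the bound is never load-bearing.

-- ===== PORT A =====
-- inner while of A's hailstone(n, find): step n, then compare with find, until n == 1
def pvLoopA (fuel : Nat) (n find : Int) : Bool :=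
  match fuel with
  | 0 => false
  | fuel + 1 =>
    if n = 1 then false
    else
      let n' := if PySem.Int.mod n 2 = 0 then PySem.Int.floordiv n 2 else 3 * n + 1
      if n' = find then true else pvLoopA fuel n' find

-- A's hailstone(n, find): the up-front 'n == find' check, then the while loop
def pvHailA (n find : Int) : Bool :=
  if n = find then true else pvLoopA 100000 n find

def same_hailstone (a : Int) (b : Int) : Bool :=
  pvHailA a b || pvHailA b a

-- ===== PORT B =====
-- one Collatz step: n//2 (Python floor division) if even, else 3n+1
def pvStepB (n : Int) : Int :=
  if PySem.Int.mod n 2 = 0 then PySem.Int.floordiv n 2 else 3 * n + 1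

-- B's fused while loop: advance x (unless at 1) and y (unless at 1) each iteration,
-- raising the found-flag when x hits b or y hits a; stop when found or both are at 1
def pvFused (fuel : Nat) (x y : Int) (a b : Int) : Bool :=
  match fuel with
  | 0 => false
  | fuel + 1 =>
    if x = 1 ∧ y = 1 then false
    else
      let x' := if x = 1 then x else pvStepB x
      let fx := ¬ x = 1 ∧ x' = b
      let y' := if y = 1 then y else pvStepB y
      let fy := ¬ y = 1 ∧ y' = a
      if fx ∨ fy then true else pvFused fuel x' y' a b

def same_hailstone_alt (a : Int) (b : Int) : Bool :=
  if a = b then true else pvFused 100000 a b a b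

-- ===== PRECONDITION & SPEC =====
-- Pre_ excludes exactly the inputs on which A's assert raises (AssertionError for a ≤ 0 or b ≤ 0)
def Pre_same_hailstone (a : Int) (b : Int) : Prop := 0 < a ∧ 0 < b
instance (a : Int) (b : Int) : Decidable (Pre_same_hailstone a b) := by
  unfold Pre_same_hailstone; infer_instance

def pvWitness_same_hailstone : Int × Int := (10, 16)

def Spec_same_hailstone (a : Int) (b : Int) (out : Bool) : Prop := out = same_hailstone_alt a b
instance (a : Int) (b : Int) (out : Bool) : Decidable (Spec_same_hailstone a b out) := by
  unfold Spec_same_hailstone; infer_instance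

-- ===== CLAIM (what is proved, stated in full; the proofs are below) =====
def Claim_equal_same_hailstone : Prop := ∀ (a : Int) (b : Int), Dom_same_hailstone a b → Pre_same_hailstone a b → Spec_same_hailstone a b (same_hailstone a b)

-- ===== LEMMAS AND PROOFS =====

-- A's inner loop never finds anything once n is 1
theorem loopA_one (fuel : Nat) (find : Int) : pvLoopA fuel 1 find = false := by
  cases fuel <;> simp [pvLoopA]

-- the fused loop equals the disjunction of A's two inner loops, at equal fuel
theorem fused_eq_loops (fuel : Nat) (x y a b : Int) :
    pvFused fuel x y a b = (pvLoopA fuel x b || pvLoopA fuel y a) := by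
  induction fuel generalizing x y with
  | zero => simp [pvFused, pvLoopA]
  | succ fuel ih =>
    by_cases hx : x = 1 <;> by_cases hy : y = 1
    · simp [pvFused, hx, hy, pvLoopA]
    · simp only [pvFused, pvLoopA, hx, hy]
      simp [ih, pvStepB, loopA_one]
    · simp only [pvFused, pvLoopA, hx, hy]
      simp [ih, pvStepB, loopA_one]
    · simp only [pvFused, pvLoopA, hx, hy]
      simp [ih, pvStepB, Bool.or_comm, Bool.or_left_comm, Bool.or_assoc]

-- ===== VERDICT (by name: the statement is the Claim_ definition above) =====
theorem same_hailstone_spec : Claim_equal_same_hailstone := by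
  intro a b _ _
  unfold Spec_same_hailstone same_hailstone same_hailstone_alt pvHailA
  by_cases hab : a = b
  · simp [hab]
  · have hba : ¬ b = a := fun h => hab h.symm
    simp [hab, hba, fused_eq_loops]
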